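-- pv_equiv track=rewrite | github.com/rafayel01/python-exercises | RV_exercises_up_to_400.py | odd_eq_even
-- ===== SOURCE A (Python) =====
-- def odd_eq_even(num: int) -> bool:
--     odd_sum: int = 0
--     even_sum: int = 0
--     ind: int = 0
--     if num // 10 == 0:
--         return False
--     else:
--         while num > 0:
--             if num // 10 == 0:
--                 if ind % 2 == 0:
--                     even_sum += num % 10
--                     num //= 10
--                 else:
--                     odd_sum += num % 10
--                     num //= 10
--             else:
--                 if ind % 2 == 0:
--                     even_sum += num % 10
--                     num //= 10
--                     ind += 1
--                 else:
--                     odd_sum += num % 10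
--                     num //= 10
--                     ind += 1
--     return odd_sum == even_sum
-- ===== SOURCE B (Python) =====
-- def odd_eq_even(num: int) -> bool:
--     # String route: split the decimal representation into the index-parity
--     # slices and compare their digit sums.
--     s = str(num)
--     if len(s) < 2:
--         return False
--     digits = [int(c) for c in s]
--     return sum(digits[0::2]) == sum(digits[1::2])
-- ===== Notes on version B (the rewrite author's own statement) =====
-- stated objective: simpler
-- what changed: B works on the decimal string instead of A's arithmetic while-loop with two sums and an index-parity counter: it converts the digits to a list and compares the sums of the two index-parity slices; Pre_ excludes negative num, where A's returned True is an accidental fall-through (its loop never runs) and B raises ValueError on the sign character.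
-- outside the precondition, e.g. on odd_eq_even(-23): A returns True, B raises ValueError
import Mathlib
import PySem

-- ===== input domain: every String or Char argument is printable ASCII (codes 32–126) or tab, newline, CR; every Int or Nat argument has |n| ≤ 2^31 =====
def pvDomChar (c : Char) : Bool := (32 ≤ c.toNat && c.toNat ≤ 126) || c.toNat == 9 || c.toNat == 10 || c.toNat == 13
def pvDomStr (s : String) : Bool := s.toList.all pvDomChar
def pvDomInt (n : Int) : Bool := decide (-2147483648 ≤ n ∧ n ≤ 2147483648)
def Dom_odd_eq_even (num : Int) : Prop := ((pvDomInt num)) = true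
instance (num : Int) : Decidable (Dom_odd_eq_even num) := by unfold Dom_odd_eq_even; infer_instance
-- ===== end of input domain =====

-- B compares the digit sums of the two index-parity slices of str(num) instead of A's
-- arithmetic while-loop with two sums and a parity counter; objective: simpler.
-- Pre_ excludes num < 0, where B raises ValueError.

-- ===== PORT A =====
-- A's while loop, state (num, odd_sum, even_sum, ind), branches in A's order; the fuel
-- counter only makes the recursion structural (num strictly shrinks, so num.toNat + 1
-- steps always suffice and the fuel-0 arm is never reached from odd_eq_even).
def oddEqEvenLoopA (fuel : Nat) (num odd_sum even_sum ind : Int) : Bool :=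
  match fuel with
  | 0 => odd_sum == even_sum
  | fuel + 1 =>
    if num > 0 then
      if PySem.Int.floordiv num 10 = 0 then
        if PySem.Int.mod ind 2 = 0 then
          oddEqEvenLoopA fuel (PySem.Int.floordiv num 10) odd_sum (even_sum + PySem.Int.mod num 10) ind
        else
          oddEqEvenLoopA fuel (PySem.Int.floordiv num 10) (odd_sum + PySem.Int.mod num 10) even_sum ind
      else
        if PySem.Int.mod ind 2 = 0 then
          oddEqEvenLoopA fuel (PySem.Int.floordiv num 10) odd_sum (even_sum + PySem.Int.mod num 10) (ind + 1)
        else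
          oddEqEvenLoopA fuel (PySem.Int.floordiv num 10) (odd_sum + PySem.Int.mod num 10) even_sum (ind + 1)
    else
      odd_sum == even_sum

def odd_eq_even (num : Int) : Bool :=
  if PySem.Int.floordiv num 10 = 0 then false
  else oddEqEvenLoopA (num.toNat + 1) num 0 0 0

-- ===== PORT B =====
-- xs[0::2], the step-2 slice from index 0: no PySem primitive takes a step other than
-- ±1, so it is ported by hand — exact: every second element starting at the head.
def everyOtherInt : List Int → List Int
  | [] => []
  | [x] => [x]
  | x :: _ :: t => x :: everyOtherInt t

def odd_eq_even_alt (num : Int) : Bool :=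
  let s := PySem.Int.toChars num            -- s = str(num), as its character list
  if s.length < 2 then false
  else
    -- digits = [int(c) for c in s]; int('-') raises ValueError (only reached when
    -- num < 0, which Pre_ excludes), rendered by the .getD default there.
    let digits : List Int := s.map (fun c => (PySem.Int.ofChars? [c]).getD 0)
    -- digits[1::2] is every second element of digits[1:], i.e. of the tail.
    (everyOtherInt digits).sum == (everyOtherInt digits.tail).sum

-- ===== PRECONDITION & SPEC =====
-- Pre_ excludes negative num, on which A's returned True is an accidental fall-through
-- (neither A's floor-division guard nor its loop condition holds, so the freshly
-- initialised sums compare equal) while B raises ValueError on the sign character.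
def Pre_odd_eq_even (num : Int) : Prop := 0 ≤ num
instance (num : Int) : Decidable (Pre_odd_eq_even num) := by unfold Pre_odd_eq_even; infer_instance
def pvWitness_odd_eq_even : Int := (1234)
def Spec_odd_eq_even (num : Int) (out : Bool) : Prop := out = odd_eq_even_alt num
instance (num : Int) (out : Bool) : Decidable (Spec_odd_eq_even num out) := by unfold Spec_odd_eq_even; infer_instance

-- ===== CLAIM (what is proved, stated in full; the proofs are below) =====
def Claim_equal_odd_eq_even : Prop := ∀ (num : Int), Dom_odd_eq_even num → Pre_odd_eq_even num → Spec_odd_eq_even num (odd_eq_even num)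

-- ===== LEMMAS AND PROOFS =====

-- Alternating digit sum of an LSB-first digit list: the one quantity both tests decide.
def pvAltSum : List Int → Int
  | [] => 0
  | d :: t => d - pvAltSum t

-- LSB-first decimal digit list of num (read through 0 ≤ num), as integers.
def pvLDigits (num : Int) : List Int := (Nat.digits 10 num.toNat).map Int.ofNat

theorem pvLDigits_step (num : Int) (h : 0 < num) :
    pvLDigits num = PySem.Int.mod num 10 :: pvLDigits (PySem.Int.floordiv num 10) := by
  unfold pvLDigits
  rw [Nat.digits_def' (by omega : 1 < 10) (by omega : 0 < num.toNat)]
  rw [PySem.Int.mod_eq_emod_of_pos (by omega), PySem.Int.floordiv_eq_ediv_of_pos (by omega)]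
  have h1 : (Int.ofNat (num.toNat % 10)) = num % 10 := by
    rw [Int.ofNat_eq_natCast]; omega
  have h2 : num.toNat / 10 = (num / 10).toNat := by omega
  rw [List.map_cons, h1, h2]

-- A's loop decides: even_sum − odd_sum + (±1 by ind parity) · (alternating digit sum) = 0.
theorem pvLoopA_char (fuel : Nat) (num odd_sum even_sum ind : Int) (hn : 0 ≤ num)
    (hf : num.toNat < fuel) :
    oddEqEvenLoopA fuel num odd_sum even_sum ind =
      decide (even_sum - odd_sum
        + (if PySem.Int.mod ind 2 = 0 then (1 : Int) else -1) * pvAltSum (pvLDigits num) = 0) := by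
  induction fuel generalizing num odd_sum even_sum ind with
  | zero => omega
  | succ k ih =>
    by_cases h : num > 0
    · have hdiv : PySem.Int.floordiv num 10 = num / 10 :=
        PySem.Int.floordiv_eq_ediv_of_pos (by omega)
      have hlt : (PySem.Int.floordiv num 10).toNat < k := by rw [hdiv]; omega
      have hge : 0 ≤ PySem.Int.floordiv num 10 := by rw [hdiv]; omega
      have hA : pvAltSum (pvLDigits num) =
          PySem.Int.mod num 10 - pvAltSum (pvLDigits (PySem.Int.floordiv num 10)) := by
        rw [pvLDigits_step num h]; rfl
      have hmod : PySem.Int.mod ind 2 = ind % 2 := PySem.Int.mod_eq_emod_of_pos (by omega)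
      have hmod1 : PySem.Int.mod (ind + 1) 2 = (ind + 1) % 2 :=
        PySem.Int.mod_eq_emod_of_pos (by omega)
      show (if num > 0 then _ else _) = _
      rw [if_pos h]
      by_cases hz : PySem.Int.floordiv num 10 = 0
      · have hA0 : pvAltSum (pvLDigits (PySem.Int.floordiv num 10)) = 0 := by
          rw [hz]; decide
        rw [if_pos hz]
        by_cases hp : PySem.Int.mod ind 2 = 0
        · rw [if_pos hp, ih _ _ _ _ hge hlt, hA, hA0]
          simp only [hp, ite_true, decide_eq_decide]
          omega
        · rw [if_neg hp, ih _ _ _ _ hge hlt, hA, hA0]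
          simp only [hp, ite_false, decide_eq_decide]
          omega
      · rw [if_neg hz]
        by_cases hp : PySem.Int.mod ind 2 = 0
        · have hp1 : ¬ PySem.Int.mod (ind + 1) 2 = 0 := by
            rw [hmod1]; rw [hmod] at hp; omega
          rw [if_pos hp, ih _ _ _ _ hge hlt, hA]
          simp only [hp, hp1, ite_true, ite_false, decide_eq_decide]
          omega
        · have hp1 : PySem.Int.mod (ind + 1) 2 = 0 := by
            rw [hmod1]; rw [hmod] at hp; omega
          rw [if_neg hp, ih _ _ _ _ hge hlt, hA]
          simp only [hp, hp1, ite_true, ite_false, decide_eq_decide]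
          omega
    · have h0 : num = 0 := by omega
      show (if num > 0 then _ else _) = _
      rw [if_neg h, h0, Bool.eq_iff_iff]
      simp only [beq_iff_eq, decide_eq_true_eq]
      have hA0 : pvAltSum (pvLDigits 0) = 0 := by decide
      rw [hA0]
      by_cases hp : PySem.Int.mod ind 2 = 0 <;> simp only [hp, ite_true, ite_false] <;> omega

theorem pvFloordiv10_eq_zero_iff (num : Int) :
    PySem.Int.floordiv num 10 = 0 ↔ 0 ≤ num ∧ num < 10 := by
  rw [PySem.Int.floordiv_eq_iff_of_pos (by omega)]
  omega

-- B side: the two slice sums differ by exactly the alternating sum.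
theorem pvAltSum_eq_slices (L : List Int) :
    pvAltSum L = (everyOtherInt L).sum - (everyOtherInt L.tail).sum := by
  induction L using everyOtherInt.induct with
  | case1 => simp [pvAltSum, everyOtherInt]
  | case2 x => simp [pvAltSum, everyOtherInt]
  | case3 x y t ih =>
    cases t with
    | nil => simp [everyOtherInt, pvAltSum]
    | cons z t' =>
      simp only [everyOtherInt, pvAltSum, List.tail_cons, List.sum_cons] at ih ⊢
      omega

-- Appending one element leaves the earlier signs alone; its own sign is the length parity.
theorem pvAltSum_append_singleton (L : List Int) (x : Int) :
    pvAltSum (L ++ [x]) = pvAltSum L + (if L.length % 2 = 0 then x else -x) := by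
  induction L with
  | nil => simp [pvAltSum]
  | cons d t ih =>
    simp only [List.cons_append, pvAltSum, ih, List.length_cons]
    by_cases hp : t.length % 2 = 0
    · have h2 : ¬ (t.length + 1) % 2 = 0 := by omega
      simp only [hp, h2, ite_true, ite_false]; ring
    · have h2 : (t.length + 1) % 2 = 0 := by omega
      simp only [hp, h2, ite_true, ite_false]; ring

theorem pvAltSum_reverse (L : List Int) :
    pvAltSum L.reverse = if L.length % 2 = 0 then -pvAltSum L else pvAltSum L := by
  induction L with
  | nil => simp [pvAltSum]
  | cons d t ih =>
    rw [List.reverse_cons, pvAltSum_append_singleton, List.length_reverse, ih]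
    simp only [pvAltSum, List.length_cons]
    by_cases hp : t.length % 2 = 0
    · have h2 : ¬ (t.length + 1) % 2 = 0 := by omega
      simp only [hp, h2, ite_true, ite_false]; ring
    · have h2 : (t.length + 1) % 2 = 0 := by omega
      simp only [hp, h2, ite_true, ite_false]; ring

theorem pvAltSum_reverse_zero_iff (L : List Int) :
    pvAltSum L.reverse = 0 ↔ pvAltSum L = 0 := by
  rw [pvAltSum_reverse]; split_ifs <;> omega

-- int() of a single decimal-digit character reads the digit back (digits below 10).
theorem pvVal_digitChar (d : Nat) (hd : d < 10) :
    (PySem.Int.ofChars? [Nat.digitChar d]).getD 0 = Int.ofNat d := by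
  interval_cases d <;> decide

-- Core's Nat.toDigitsCore, characterised through Mathlib's Nat.digits (0 < n).
theorem pvToDigitsCore_eq (fuel : Nat) : ∀ (n : Nat) (ds : List Char), 0 < n → n ≤ fuel →
    Nat.toDigitsCore 10 fuel n ds = ((Nat.digits 10 n).map Nat.digitChar).reverse ++ ds := by
  induction fuel with
  | zero => intro n ds h hf; omega
  | succ k ih =>
    intro n ds h hf
    rw [Nat.toDigitsCore]
    rw [Nat.digits_def' (by omega : 1 < 10) h]
    by_cases hz : n / 10 = 0
    · rw [if_pos hz, hz]
      simp
    · rw [if_neg hz, ih (n / 10) _ (by omega) (by omega)]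
      simp

theorem pvToDigits_eq (n : Nat) (h : 0 < n) :
    Nat.toDigits 10 n = ((Nat.digits 10 n).map Nat.digitChar).reverse := by
  rw [Nat.toDigits, pvToDigitsCore_eq (n + 1) n [] h (by omega)]
  simp

theorem pvToChars_nonneg (num : Int) (h : 0 ≤ num) :
    PySem.Int.toChars num = Nat.toDigits 10 num.toNat := by
  unfold PySem.Int.toChars
  rw [if_neg (by omega : ¬ num < 0)]

-- ===== VERDICT (by name: the statement is the Claim_ definition above) =====
theorem odd_eq_even_spec : Claim_equal_odd_eq_even := by
  intro num _ hpre
  unfold Pre_odd_eq_even at hpre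
  unfold Spec_odd_eq_even odd_eq_even odd_eq_even_alt
  simp only [pvToChars_nonneg num hpre]
  by_cases hz : PySem.Int.floordiv num 10 = 0
  · -- 0 ≤ num < 10: both guards fire.
    have hb := (pvFloordiv10_eq_zero_iff num).mp hz
    have hlen : (Nat.toDigits 10 num.toNat).length < 2 := by
      have := Nat.toDigits_length 10 num.toNat 1 (by omega) (by omega : num.toNat < 10 ^ 1)
      omega
    rw [if_pos hz, if_pos hlen]
  · -- num ≥ 10.
    have hge : (10 : Int) ≤ num := by
      rcases (lt_or_ge num 10) with hlt | hge
      · exact absurd ((pvFloordiv10_eq_zero_iff num).mpr ⟨hpre, hlt⟩) hz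
      · exact hge
    have hpos : 0 < num.toNat := by omega
    have hchars : Nat.toDigits 10 num.toNat = ((Nat.digits 10 num.toNat).map Nat.digitChar).reverse :=
      pvToDigits_eq num.toNat hpos
    have hdlen : 2 ≤ (Nat.digits 10 num.toNat).length := by
      have := (Nat.lt_digits_length_iff (b := 10) (k := 1) (by omega) num.toNat).mpr
        (by omega : 10 ^ 1 ≤ num.toNat)
      omega
    have hlen : ¬ (Nat.toDigits 10 num.toNat).length < 2 := by
      rw [hchars]; simp only [List.length_reverse, List.length_map]; omega
    rw [if_neg hz, if_neg hlen]
    -- identify B's digit list with the reversed LSB digit list.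
    have hdig : (Nat.toDigits 10 num.toNat).map (fun c => (PySem.Int.ofChars? [c]).getD 0)
        = (pvLDigits num).reverse := by
      rw [hchars, pvLDigits]
      rw [List.map_reverse, List.map_map]
      congr 1
      apply List.map_congr_left
      intro d hd
      exact pvVal_digitChar d (Nat.digits_lt_base (by omega) hd)
    rw [hdig]
    rw [pvLoopA_char (num.toNat + 1) num 0 0 0 hpre (by omega)]
    have hm : PySem.Int.mod 0 2 = 0 := by decide
    rw [hm]
    simp only [ite_true]
    have hr : (0 : Int) - 0 + 1 * pvAltSum (pvLDigits num) = pvAltSum (pvLDigits num) := by ring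
    rw [hr, Bool.eq_iff_iff]
    simp only [beq_iff_eq, decide_eq_true_eq]
    rw [← pvAltSum_reverse_zero_iff (pvLDigits num), pvAltSum_eq_slices]
    omega
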